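-- pv_equiv track=rewrite | github.com/wkd3475/NLP_learning | assignment4/word2vec.py | n_gram_tokenize
-- ===== SOURCE A (Python) =====
-- def n_gram_tokenize(vocabs):
--     n_gram_vocab = []
--     n_gram_dic = {}
--     for word_ in vocabs:
--         word = "<" + word_ + ">"
--         n_gram_dic[word_] = []
--
--         l = len(word)
--         #2~6_gram
--         for i in range(1, 6):
--             if l - i > 0:
--                 for j in range(l - i):
--                     if word[j:j+i+1] not in n_gram_vocab:
--                         n_gram_vocab.append(word[j:j+i+1])
--                         #n_gram_vocab.append(fnv32a(word[j:j+i+1]))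
--                     n_gram_dic[word_].append((word[j:j+i+1]))
--                     #n_gram_dic[word_].append((fnv32a(word[j:j+i+1])))
--         #special
--         if l - 6 > 0:
--             if word not in n_gram_vocab:
--                 n_gram_vocab.append(word)
--                 #n_gram_vocab.append(fnv32a(word))
--             n_gram_dic[word_].append(word)
--             #n_gram_dic[word_].append(fnv32a(word))
--     return n_gram_vocab, n_gram_dic
-- ===== SOURCE B (Python) =====
-- def n_gram_tokenize(vocabs):
--     n_gram_dic = {}
--     for word_ in vocabs:
--         word = "<" + word_ + ">"
--         l = len(word)
--         grams = [word[j:j+i] for i in range(2, 7) for j in range(l - i + 1)]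
--         if l > 6:
--             grams.append(word)
--         n_gram_dic[word_] = grams
--     first = {}
--     idx = 0
--     for gs in n_gram_dic.values():
--         for g in gs:
--             first[g] = min(first.get(g, idx), idx)
--             idx += 1
--     n_gram_vocab = [g for g, _ in sorted(first.items(), key=lambda kv: kv[1])]
--     return n_gram_vocab, n_gram_dic
-- ===== Notes on version B (the rewrite author's own statement) =====
-- stated objective: faster
-- what changed: A builds the vocab online with an O(V) 'not in' list scan per n-gram interleaved with the dict; B first fills the per-word dict, then streams all grams with a running index, records each gram's minimum occurrence index in a dict, and emits the vocab by sorting the (gram, min-index) pairs by index - dedup by min-index + stable sort instead of online membership scans.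
import Mathlib
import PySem

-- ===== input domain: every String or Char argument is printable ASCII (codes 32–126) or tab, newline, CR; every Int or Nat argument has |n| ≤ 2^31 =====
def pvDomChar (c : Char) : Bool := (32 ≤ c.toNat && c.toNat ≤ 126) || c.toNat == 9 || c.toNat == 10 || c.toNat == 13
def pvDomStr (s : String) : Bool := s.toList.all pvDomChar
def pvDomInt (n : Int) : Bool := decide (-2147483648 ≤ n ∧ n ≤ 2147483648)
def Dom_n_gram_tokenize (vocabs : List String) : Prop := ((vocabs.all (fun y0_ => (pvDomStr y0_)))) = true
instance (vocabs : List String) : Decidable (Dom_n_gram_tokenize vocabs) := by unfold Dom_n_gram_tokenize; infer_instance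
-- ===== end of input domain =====

-- B replaces A's interleaved single pass (online vocab dedup via an O(V) 'not in' scan per
-- n-gram) by staged passes: fill the dict, then record each gram's minimum stream index in a
-- dict and sort the (gram, index) pairs by index to obtain the vocab (faster in a timing run).

-- ===== PORT A =====
def n_gram_tokenize (vocabs : List String) : List String × (List (String × List String)) :=
  let st := vocabs.foldl
    (fun (st : List String × PySem.Dict String (List String)) word_ =>
      let word := "<" ++ word_ ++ ">"
      let st := (st.1, st.2.insert word_ ([] : List String))
      let l : Int := PySem.Str.len word
      let st := (PySem.List.pyRange 1 6 1).foldl (fun st i =>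
        if l - i > 0 then
          (PySem.List.pyRange 0 (l - i) 1).foldl (fun st j =>
            let g := PySem.Str.slice word (some j) (some (j + i + 1))
            ((if st.1.contains g then st.1 else st.1 ++ [g]), st.2.modify word_ [] (· ++ [g]))) st
        else st) st
      if l - 6 > 0 then
        ((if st.1.contains word then st.1 else st.1 ++ [word]), st.2.modify word_ [] (· ++ [word]))
      else st)
    ([], PySem.Dict.empty)
  (st.1, st.2.items)

-- ===== PORT B =====
-- per-word gram list: the comprehension plus the special whole-word gram
def altGrams (word_ : String) : List String :=
  let word := "<" ++ word_ ++ ">"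
  let l : Int := PySem.Str.len word
  let grams := (PySem.List.pyRange 2 7 1).flatMap (fun i =>
    (PySem.List.pyRange 0 (l - i + 1) 1).map (fun j => PySem.Str.slice word (some j) (some (j + i))))
  if l > 6 then grams ++ [word] else grams

def n_gram_tokenize_alt (vocabs : List String) : List String × (List (String × List String)) :=
  let dic := vocabs.foldl
    (fun (d : PySem.Dict String (List String)) word_ => d.insert word_ (altGrams word_))
    PySem.Dict.empty
  let first := dic.values.foldl
    (fun (st : PySem.Dict String Int × Int) gs =>
      gs.foldl (fun (st : PySem.Dict String Int × Int) g =>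
        (st.1.insert g (min (st.1.getD g st.2) st.2), st.2 + 1)) st)
    (PySem.Dict.empty, 0)
  ((PySem.List.sorted first.1.items (fun kv => kv.2) false).map Prod.fst, dic.items)

-- ===== PRECONDITION & SPEC =====
def Spec_n_gram_tokenize (vocabs : List String) (out : List String × (List (String × List String))) : Prop := out = n_gram_tokenize_alt vocabs
instance (vocabs : List String) (out : List String × (List (String × List String))) : Decidable (Spec_n_gram_tokenize vocabs out) := by unfold Spec_n_gram_tokenize; infer_instance

-- ===== CLAIM (what is proved, stated in full; the proofs are below) =====
def Claim_equal_n_gram_tokenize : Prop := ∀ (vocabs : List String), Dom_n_gram_tokenize vocabs → Spec_n_gram_tokenize vocabs (n_gram_tokenize vocabs)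

-- ===== LEMMAS AND PROOFS =====

theorem pv_update_append {α : Type} [BEq α] (s : PySem.Set α) (xs ys : List α) :
    PySem.Set.update s (xs ++ ys) = PySem.Set.update (PySem.Set.update s xs) ys :=
  List.foldl_append

theorem pv_update_eq_self {α : Type} [BEq α] [LawfulBEq α] (l : List α) :
    ∀ (s : PySem.Set α), (∀ x ∈ l, x ∈ s) → PySem.Set.update s l = s := by
  induction l with
  | nil => intro s _; rfl
  | cons x xs ih =>
    intro s h
    have hx : x ∈ s := h x (by simp)
    show PySem.Set.update (s.add x) xs = s
    rw [show s.add x = s by simp [PySem.Set.add, hx]]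
    exact ih s (fun y hy => h y (by simp [hy]))

-- A's interleaved inner step, folded over an arbitrary list of grams
theorem pv_comb (w : String) (gs : List String) :
    ∀ (v : List String) (d : PySem.Dict String (List String)) (acc : List String),
    gs.foldl (fun (st : List String × PySem.Dict String (List String)) g =>
        ((if st.1.contains g then st.1 else st.1 ++ [g]), st.2.modify w [] (· ++ [g])))
      (v, d.insert w acc)
    = (PySem.Set.update v gs, d.insert w (acc ++ gs)) := by
  induction gs with
  | nil => intro v d acc; simp [PySem.Set.update]
  | cons g gs ih =>
    intro v d acc
    simp only [List.foldl_cons]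
    have hd : (d.insert w acc).modify w [] (· ++ [g]) = d.insert w (acc ++ [g]) := by
      simp [PySem.Dict.modify, PySem.Dict.getD_insert_self, PySem.Dict.insert_insert_self]
    rw [hd, ih (if v.contains g then v else v ++ [g]) d (acc ++ [g])]
    simp [PySem.Set.update, PySem.Set.add, List.foldl_cons, List.append_assoc]

theorem pv_modify_insert (d : PySem.Dict String (List String)) (w : String)
    (acc : List String) (g : String) :
    (d.insert w acc).modify w [] (· ++ [g]) = d.insert w (acc ++ [g]) := by
  simp [PySem.Dict.modify, PySem.Dict.getD_insert_self, PySem.Dict.insert_insert_self]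

theorem pv_addone {α : Type} [BEq α] (s : List α) (x : α) :
    (if s.contains x then s else s ++ [x]) = PySem.Set.update s [x] := rfl

theorem pv_update_add {α : Type} [BEq α] (s : PySem.Set α) (L : List α) (x : α) :
    (PySem.Set.update s L).add x = PySem.Set.update s (L ++ [x]) := by
  rw [pv_update_append]
  rfl

theorem pv_seg (w word : String) (l : Int) (i : Int)
    (st : List String × PySem.Dict String (List String)) :
    (if l - i > 0 then
      (PySem.List.pyRange 0 (l - i) 1).foldl (fun st j =>
        ((if st.1.contains (PySem.Str.slice word (some j) (some (j + i + 1))) then st.1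
          else st.1 ++ [PySem.Str.slice word (some j) (some (j + i + 1))]),
         st.2.modify w [] (· ++ [PySem.Str.slice word (some j) (some (j + i + 1))]))) st
    else st)
    = (PySem.List.pyRange 0 (l - i) 1).foldl (fun st j =>
        ((if st.1.contains (PySem.Str.slice word (some j) (some (j + i + 1))) then st.1
          else st.1 ++ [PySem.Str.slice word (some j) (some (j + i + 1))]),
         st.2.modify w [] (· ++ [PySem.Str.slice word (some j) (some (j + i + 1))]))) st := by
  split_ifs with h
  · rfl
  · rw [PySem.List.pyRange_one_eq_nil (by omega), List.foldl_nil]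

def pvGsA (word : String) (l i : Int) : List String :=
  (PySem.List.pyRange 0 (l - i) 1).map (fun j => PySem.Str.slice word (some j) (some (j + i + 1)))

theorem pv_inner (w word : String) (l i : Int) (v : List String)
    (d : PySem.Dict String (List String)) (acc : List String) :
    (PySem.List.pyRange 0 (l - i) 1).foldl (fun st j =>
        ((if st.1.contains (PySem.Str.slice word (some j) (some (j + i + 1))) then st.1
          else st.1 ++ [PySem.Str.slice word (some j) (some (j + i + 1))]),
         st.2.modify w [] (· ++ [PySem.Str.slice word (some j) (some (j + i + 1))])))
      (v, d.insert w acc)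
    = (PySem.Set.update v (pvGsA word l i), d.insert w (acc ++ pvGsA word l i)) := by
  have h := pv_comb w (pvGsA word l i) v d acc
  rw [pvGsA, List.foldl_map] at h
  exact h

theorem pv_gsA_eq (word : String) (l i i' : Int) (h : i' = i + 1) :
    pvGsA word l i = (PySem.List.pyRange 0 (l - i' + 1) 1).map
      (fun j => PySem.Str.slice word (some j) (some (j + i'))) := by
  subst h
  rw [pvGsA, show l - (i + 1) + 1 = l - i by ring]
  apply List.map_congr_left
  intro j _
  rw [show j + (i + 1) = j + i + 1 by ring]

-- A's per-word step equals: dedup-append of altGrams into the vocab, insert altGrams into the dict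
theorem pv_step (st : List String × PySem.Dict String (List String)) (word_ : String) :
    (let word := "<" ++ word_ ++ ">"
     let st := (st.1, st.2.insert word_ ([] : List String))
     let l : Int := PySem.Str.len word
     let st := (PySem.List.pyRange 1 6 1).foldl (fun st i =>
       if l - i > 0 then
         (PySem.List.pyRange 0 (l - i) 1).foldl (fun st j =>
           let g := PySem.Str.slice word (some j) (some (j + i + 1))
           ((if st.1.contains g then st.1 else st.1 ++ [g]), st.2.modify word_ [] (· ++ [g]))) st
       else st) st
     if l - 6 > 0 then
       ((if st.1.contains word then st.1 else st.1 ++ [word]), st.2.modify word_ [] (· ++ [word]))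
     else st)
    = (PySem.Set.update st.1 (altGrams word_), st.2.insert word_ (altGrams word_)) := by
  obtain ⟨v, d⟩ := st
  simp only [altGrams, show PySem.List.pyRange 1 6 1 = [1,2,3,4,5] by decide,
    show PySem.List.pyRange 2 7 1 = [2,3,4,5,6] by decide,
    List.foldl_cons, List.foldl_nil, List.flatMap_cons, List.flatMap_nil, List.append_nil]
  rw [pv_seg, pv_seg, pv_seg, pv_seg, pv_seg,
    pv_inner, pv_inner, pv_inner, pv_inner, pv_inner,
    pv_gsA_eq _ _ 1 2 (by norm_num), pv_gsA_eq _ _ 2 3 (by norm_num),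
    pv_gsA_eq _ _ 3 4 (by norm_num), pv_gsA_eq _ _ 4 5 (by norm_num),
    pv_gsA_eq _ _ 5 6 (by norm_num)]
  simp only []
  by_cases h6 : PySem.Str.len ("<" ++ word_ ++ ">") - 6 > 0
  · rw [if_pos h6, if_pos (show PySem.Str.len ("<" ++ word_ ++ ">") > 6 by omega),
      pv_addone, pv_modify_insert]
    simp [← pv_update_append, List.append_assoc, pv_update_add]
  · rw [if_neg h6, if_neg (show ¬ (PySem.Str.len ("<" ++ word_ ++ ">") > 6) by omega)]
    simp [← pv_update_append, List.append_assoc]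

-- product fold splits into independent folds
theorem pv_prod_fold (ws : List String) :
    ∀ (v : List String) (d : PySem.Dict String (List String)),
    ws.foldl (fun (st : List String × PySem.Dict String (List String)) w =>
        (PySem.Set.update st.1 (altGrams w), st.2.insert w (altGrams w))) (v, d)
    = (ws.foldl (fun v w => PySem.Set.update v (altGrams w)) v,
       ws.foldl (fun d w => d.insert w (altGrams w)) d) := by
  induction ws with
  | nil => intro v d; rfl
  | cons w ws ih => intro v d; simp only [List.foldl_cons]; exact ih _ _

theorem pv_fold_update (ws : List String) :
    ∀ (v : List String),
    ws.foldl (fun v w => PySem.Set.update v (altGrams w)) v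
    = PySem.Set.update v ((ws.map altGrams).flatten) := by
  induction ws with
  | nil => intro v; rfl
  | cons w ws ih =>
    intro v
    simp only [List.foldl_cons, List.map_cons, List.flatten_cons]
    rw [ih, pv_update_append]

theorem pv_getD_fold (ws : List String) :
    ∀ (d : PySem.Dict String (List String)) (k : String),
    (ws.foldl (fun d w => d.insert w (altGrams w)) d).getD k []
    = if k ∈ ws then altGrams k else d.getD k [] := by
  induction ws using List.reverseRecOn with
  | nil => intro d k; simp
  | append_singleton ws w ih =>
    intro d k
    rw [List.foldl_append, List.foldl_cons, List.foldl_nil, PySem.Dict.getD_insert, ih]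
    by_cases hk : k = w
    · simp [hk]
    · simp [hk]

theorem pv_dedup_append (ws : List String) (w : String) :
    PySem.List.dedup (ws ++ [w])
    = if w ∈ ws then PySem.List.dedup ws else PySem.List.dedup ws ++ [w] := by
  have hsplit : PySem.Set.ofList (ws ++ [w]) = (PySem.Set.ofList ws).add w := by
    rw [PySem.Set.ofList, PySem.Set.ofList, List.foldl_append]
    rfl
  rw [PySem.List.dedup_eq_ofList, PySem.List.dedup_eq_ofList, hsplit, PySem.Set.add]
  by_cases hw : w ∈ ws
  · rw [if_pos (by simp [(PySem.Set.mem_ofList ws w).2 hw]), if_pos hw]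
  · rw [if_neg (by simp [PySem.Set.mem_ofList, hw]), if_neg hw]

theorem pv_core (ws : List String) :
    ∀ (v : List String),
    PySem.Set.update v ((ws.map altGrams).flatten)
    = PySem.Set.update v (((PySem.List.dedup ws).map altGrams).flatten) := by
  induction ws using List.reverseRecOn with
  | nil => intro v; rfl
  | append_singleton ws w ih =>
    intro v
    rw [List.map_append, List.flatten_append, pv_update_append, ih, pv_dedup_append]
    by_cases hw : w ∈ ws
    · rw [if_pos hw]
      simp only [List.map_cons, List.map_nil, List.flatten_cons, List.flatten_nil, List.append_nil]
      rw [← ih]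
      apply pv_update_eq_self
      intro g hg
      rw [PySem.Set.mem_update]
      right
      exact List.mem_flatten.2 ⟨altGrams w, List.mem_map_of_mem hw, hg⟩
    · rw [if_neg hw, List.map_append, List.flatten_append, pv_update_append]

theorem pv_dict_keys (ws : List String) :
    (ws.foldl (fun (d : PySem.Dict String (List String)) w => d.insert w (altGrams w))
      PySem.Dict.empty).keys = PySem.List.dedup ws := by
  rw [PySem.Dict.keys_foldl_insert (f := fun _ w => altGrams w), PySem.Dict.keys_empty,
    PySem.List.dedup_eq_ofList, PySem.Set.ofList, PySem.Set.update]
  rfl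

theorem pv_values (ws : List String) :
    (ws.foldl (fun (d : PySem.Dict String (List String)) w => d.insert w (altGrams w))
      PySem.Dict.empty).values = (PySem.List.dedup ws).map altGrams := by
  rw [PySem.Dict.values_eq_map_keys _ (by
        exact PySem.Dict.nodup_keys_foldl_insert ws (fun _ w => altGrams w) _
          (by simp)) ([] : List String),
    pv_dict_keys]
  apply List.map_congr_left
  intro k hk
  rw [pv_getD_fold ws PySem.Dict.empty k,
    if_pos (by simpa [PySem.List.dedup_eq_ofList, PySem.Set.mem_ofList] using hk)]

-- ---- B's phase 2: min-index fold then sort ----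

-- the nested fold over the value lists equals the fold over the flattened gram stream
theorem pv_foldl_flatten {α β : Type} (f : β → α → β) (lss : List (List α)) :
    ∀ (st : β), lss.foldl (fun st gs => gs.foldl f st) st = lss.flatten.foldl f st := by
  induction lss with
  | nil => intro st; rfl
  | cons gs lss ih =>
    intro st
    simp only [List.foldl_cons, List.flatten_cons, List.foldl_append]
    exact ih _

-- one step of the min-index fold
def pvStep (st : PySem.Dict String Int × Int) (g : String) : PySem.Dict String Int × Int :=
  (st.1.insert g (min (st.1.getD g st.2) st.2), st.2 + 1)

-- keys follow first occurrences; values stay strictly increasing and below the counter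
theorem pv_phase2 (S : List String) :
    ∀ (d : PySem.Dict String Int) (n : Int),
    d.keys.Nodup → (d.items.map Prod.snd).Pairwise (· < ·) → (∀ p ∈ d.items, p.2 < n) →
    (S.foldl pvStep (d, n)).1.keys = PySem.Set.update d.keys S ∧
    (S.foldl pvStep (d, n)).1.keys.Nodup ∧
    ((S.foldl pvStep (d, n)).1.items.map Prod.snd).Pairwise (· < ·) := by
  induction S with
  | nil => intro d n h1 h2 _; exact ⟨rfl, h1, h2⟩
  | cons g S ih =>
    intro d n h1 h2 h3
    simp only [List.foldl_cons]
    by_cases hc : d.contains g = true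
    · -- existing key: the insert rewrites the same value in place, the dict is unchanged
      obtain ⟨v, hv⟩ : ∃ v, d.get? g = some v := by
        rcases h : d.get? g with _ | v
        · rw [PySem.Dict.contains_eq_isSome_get?, h] at hc; simp at hc
        · exact ⟨v, rfl⟩
      have hmem : (g, v) ∈ d.items := PySem.Dict.mem_items_of_get?_eq_some _ hv
      have hvd : d.getD g n = v := PySem.Dict.getD_of_get?_eq_some d n hv
      have hvlt : v < n := h3 _ hmem
      have hstep : pvStep (d, n) g = (d, n + 1) := by
        unfold pvStep
        simp only [hvd, min_eq_left (le_of_lt hvlt)]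
        congr 1
        apply PySem.Dict.ext
        rw [PySem.Dict.items_insert_of_contains _ _ hc]
        have : ∀ p ∈ d.items, (if p.1 == g then (g, v) else p) = p := by
          intro p hp
          by_cases hpg : p.1 = g
          · have : p = (g, v) := by
              have hinj := List.inj_on_of_nodup_map (f := Prod.fst) h1
              exact hinj hp hmem (by simp [hpg])
            simp [this]
          · simp [hpg]
        rw [List.map_congr_left this, List.map_id']
      rw [hstep]
      have hkeys : PySem.Set.add d.keys g = d.keys := by
        have : g ∈ d.keys := (PySem.Dict.contains_iff_mem_keys d g).1 hc
        simp [PySem.Set.add, this]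
      have := ih d (n + 1) h1 h2 (fun p hp => lt_trans (h3 p hp) (by omega))
      refine ⟨?_, this.2.1, this.2.2⟩
      rw [this.1]
      show PySem.Set.update d.keys S = PySem.Set.update (PySem.Set.add d.keys g) S
      rw [hkeys]
    · -- new key: appended with value n
      have hvd : d.getD g n = n := by
        rw [PySem.Dict.getD_eq_get?_getD,
          show d.get? g = none from (PySem.Dict.get?_eq_none_iff_contains d g).2
            (by simpa using hc)]
        rfl
      have hstep : pvStep (d, n) g = (d.insert g n, n + 1) := by
        unfold pvStep; simp [hvd]
      rw [hstep]
      have hitems : (d.insert g n).items = d.items ++ [(g, n)] := by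
        rw [PySem.Dict.items_insert]
        simp [hc]
      have hkeys' : (d.insert g n).keys = d.keys ++ [g] := by
        simp [PySem.Dict.keys, hitems]
      have hgnot : g ∉ d.keys := fun h => hc ((PySem.Dict.contains_iff_mem_keys d g).2 h)
      have h1' : (d.insert g n).keys.Nodup := by
        rw [hkeys']
        exact List.Nodup.append h1 (List.nodup_singleton g)
          (by simpa using fun h => hgnot h)
      have h2' : ((d.insert g n).items.map Prod.snd).Pairwise (· < ·) := by
        rw [hitems, List.map_append]
        refine List.pairwise_append.2 ⟨h2, by simp, ?_⟩
        intro a ha b hb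
        simp at hb
        subst hb
        obtain ⟨p, hp, hpa⟩ := List.mem_map.1 ha
        exact hpa ▸ h3 p hp
      have h3' : ∀ p ∈ (d.insert g n).items, p.2 < n + 1 := by
        intro p hp
        rw [hitems] at hp
        rcases List.mem_append.1 hp with h | h
        · exact lt_trans (h3 p h) (by omega)
        · simp at h; subst h; omega
      have := ih (d.insert g n) (n + 1) h1' h2' h3'
      refine ⟨?_, this.2.1, this.2.2⟩
      rw [this.1, hkeys']
      show PySem.Set.update (d.keys ++ [g]) S = PySem.Set.update (PySem.Set.add d.keys g) S
      congr 1
      simp [PySem.Set.add, hgnot]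

-- with strictly increasing values, the stable sort by value leaves the items in place,
-- and taking first components yields the keys = the first-occurrence dedup of the stream
theorem pv_phase2_vocab (S : List String) :
    (PySem.List.sorted (S.foldl pvStep (PySem.Dict.empty, 0)).1.items
      (fun kv => kv.2) false).map Prod.fst = PySem.List.dedup S := by
  obtain ⟨hkeys, _, hpair⟩ := pv_phase2 S PySem.Dict.empty 0 (by simp) (by exact List.Pairwise.nil)
    (by intro p hp; exact absurd hp List.not_mem_nil)
  have hpair' : (S.foldl pvStep (PySem.Dict.empty, 0)).1.items.Pairwise
      (fun a b => (fun kv : String × Int => kv.2) a < (fun kv : String × Int => kv.2) b) :=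
    (List.pairwise_map.1 hpair)
  have hs := PySem.List.sorted_eq_of_perm_of_pairwise_lt _ _ (fun kv : String × Int => kv.2)
      (List.Perm.refl (S.foldl pvStep (PySem.Dict.empty, 0)).1.items) hpair'
  rw [hs]
  show (S.foldl pvStep (PySem.Dict.empty, 0)).1.keys = PySem.List.dedup S
  rw [hkeys, PySem.Dict.keys_empty, PySem.List.dedup_eq_ofList, PySem.Set.ofList]
  rfl

-- ===== VERDICT (by name: the statement is the Claim_ definition above) =====
theorem n_gram_tokenize_spec : Claim_equal_n_gram_tokenize := by
  intro vocabs _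
  unfold Spec_n_gram_tokenize
  simp only [n_gram_tokenize, n_gram_tokenize_alt]
  have hbody : (fun (st : List String × PySem.Dict String (List String)) word_ =>
      let word := "<" ++ word_ ++ ">"
      let st := (st.1, st.2.insert word_ ([] : List String))
      let l : Int := PySem.Str.len word
      let st := (PySem.List.pyRange 1 6 1).foldl (fun st i =>
        if l - i > 0 then
          (PySem.List.pyRange 0 (l - i) 1).foldl (fun st j =>
            let g := PySem.Str.slice word (some j) (some (j + i + 1))
            ((if st.1.contains g then st.1 else st.1 ++ [g]), st.2.modify word_ [] (· ++ [g]))) st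
        else st) st
      if l - 6 > 0 then
        ((if st.1.contains word then st.1 else st.1 ++ [word]), st.2.modify word_ [] (· ++ [word]))
      else st)
      = (fun (st : List String × PySem.Dict String (List String)) w =>
          (PySem.Set.update st.1 (altGrams w), st.2.insert w (altGrams w))) := by
    funext st w
    exact pv_step st w
  rw [hbody, pv_prod_fold, pv_fold_update, pv_core, pv_values vocabs]
  have hps : (fun (st : PySem.Dict String Int × Int) g =>
      (st.1.insert g (min (st.1.getD g st.2) st.2), st.2 + 1)) = pvStep := rfl
  rw [hps, pv_foldl_flatten pvStep ((PySem.List.dedup vocabs).map altGrams)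
        (PySem.Dict.empty, 0),
    pv_phase2_vocab]
  simp only [PySem.List.dedup_eq_ofList, PySem.Set.ofList, PySem.Set.update]
  rfl
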